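-- pv_equiv track=rewrite | github.com/1Password/connect-sdk-python | src/onepasswordconnectsdk/utils.py | is_valid_uuid
-- ===== SOURCE A (Python) =====
-- UUIDLength = 26
--
-- def is_valid_uuid(uuid):
--     if len(uuid) is not UUIDLength:
--         return False
--     for c in uuid:
--         valid = (c >= 'a' and c <= 'z') or (c >= '0' and c <= '9')
--         if valid is False:
--             return False
--     return True
-- ===== SOURCE B (Python) =====
-- import re
--
-- _UUID_RE = re.compile(r'[a-z0-9]{26}')
--
-- def is_valid_uuid(uuid):
--     return bool(_UUID_RE.fullmatch(uuid))
-- ===== Notes on version B (the rewrite author's own statement) =====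
-- stated objective: idiomatic
-- what changed: Replaced the explicit length guard plus per-character early-return loop with a single anchored compiled regex fullmatch r'[a-z0-9]{26}'.
import Mathlib
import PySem

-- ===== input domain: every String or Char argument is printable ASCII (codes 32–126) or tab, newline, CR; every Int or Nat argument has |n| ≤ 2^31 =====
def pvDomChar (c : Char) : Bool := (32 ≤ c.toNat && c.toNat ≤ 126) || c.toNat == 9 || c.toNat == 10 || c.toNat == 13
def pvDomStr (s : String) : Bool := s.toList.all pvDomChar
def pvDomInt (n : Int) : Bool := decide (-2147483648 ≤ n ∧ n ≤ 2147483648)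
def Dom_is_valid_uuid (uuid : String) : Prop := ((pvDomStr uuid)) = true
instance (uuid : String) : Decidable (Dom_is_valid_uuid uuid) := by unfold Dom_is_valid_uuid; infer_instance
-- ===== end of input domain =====

-- B changes only the mechanism: one anchored regex fullmatch instead of a length guard plus a per-character loop (objective: idiomatic).

-- ===== PORT A =====
-- the `for c in uuid` loop with its early `return False`
def is_valid_uuid_loop : List Char → Bool
  | [] => true
  | c :: rest =>
      let valid := (('a' ≤ c && c ≤ 'z') || ('0' ≤ c && c ≤ '9'))
      if valid = false then false else is_valid_uuid_loop rest

def is_valid_uuid (uuid : String) : Bool :=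
  if uuid.toList.length ≠ 26 then false
  else is_valid_uuid_loop uuid.toList

-- ===== PORT B =====
-- re.fullmatch(r'[a-z0-9]{26}', uuid): anchored match = exactly 26 chars, each in the class
def is_valid_uuid_alt (uuid : String) : Bool :=
  uuid.toList.length == 26 &&
    uuid.toList.all (fun c => ('a' ≤ c && c ≤ 'z') || ('0' ≤ c && c ≤ '9'))

-- ===== PRECONDITION & SPEC =====
def Spec_is_valid_uuid (uuid : String) (out : Bool) : Prop := out = is_valid_uuid_alt uuid
instance (uuid : String) (out : Bool) : Decidable (Spec_is_valid_uuid uuid out) := by unfold Spec_is_valid_uuid; infer_instance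

-- ===== CLAIM (what is proved, stated in full; the proofs are below) =====
def Claim_equal_is_valid_uuid : Prop := ∀ (uuid : String), Dom_is_valid_uuid uuid → Spec_is_valid_uuid uuid (is_valid_uuid uuid)

-- ===== LEMMAS AND PROOFS =====
theorem loop_eq_all (l : List Char) :
    is_valid_uuid_loop l = l.all (fun c => ('a' ≤ c && c ≤ 'z') || ('0' ≤ c && c ≤ '9')) := by
  induction l with
  | nil => rfl
  | cons c rest ih =>
      simp only [is_valid_uuid_loop, List.all_cons, ih]
      by_cases h : (('a' ≤ c && c ≤ 'z') || ('0' ≤ c && c ≤ '9')) = true <;> simp [h]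

-- ===== VERDICT (by name: the statement is the Claim_ definition above) =====
theorem is_valid_uuid_spec : Claim_equal_is_valid_uuid := by
  intro uuid _
  unfold Spec_is_valid_uuid is_valid_uuid is_valid_uuid_alt
  by_cases h : uuid.toList.length = 26 <;>
    simp [h, loop_eq_all, Bool.beq_eq_decide_eq]
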